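-- pv_equiv track=rewrite | github.com/adnathanail/aoc | 2022/day13/part1.py | get_line_pairs
-- ===== SOURCE A (Python) =====
-- def get_line_pairs(inp: str) -> list[tuple[str, str]]:
--     out = []
--     lines = inp.split("\n")
--     last_line = ""
--     for i in range(len(lines)):
--         if i % 3 == 0:
--             last_line = lines[i]
--         elif i % 3 == 1:
--             out.append((last_line, lines[i]))
--         else:
--             last_line = ""
--     return out
-- ===== SOURCE B (Python) =====
-- def get_line_pairs(inp: str) -> list[tuple[str, str]]:
--     lines = inp.split("\n")
--     return list(zip(lines[::3], lines[1::3]))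
-- ===== Notes on version B (the rewrite author's own statement) =====
-- stated objective: idiomatic
-- what changed: Replaces the index loop with its modulo-3 branching and last_line accumulator by two strided slices (lines[::3], lines[1::3]) zipped together; zip's truncation reproduces A's behaviour when the final triple has only one line.
import Mathlib
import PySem

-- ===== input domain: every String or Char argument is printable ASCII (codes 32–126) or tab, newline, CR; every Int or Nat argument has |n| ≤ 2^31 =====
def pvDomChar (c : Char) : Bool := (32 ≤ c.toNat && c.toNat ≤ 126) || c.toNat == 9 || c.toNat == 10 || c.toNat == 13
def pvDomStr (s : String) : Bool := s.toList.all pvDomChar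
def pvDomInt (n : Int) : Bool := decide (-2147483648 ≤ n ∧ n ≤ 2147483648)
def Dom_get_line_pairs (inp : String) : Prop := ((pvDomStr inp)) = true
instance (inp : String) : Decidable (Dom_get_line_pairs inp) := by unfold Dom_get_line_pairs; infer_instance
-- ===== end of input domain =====

-- ===== PORT A =====
-- B pairs lines via zipped strided slices instead of A's modulo-3 index loop (idiomatic; same cost).
def get_line_pairs (inp : String) : List (String × String) :=
  let lines := (PySem.Str.split? inp "\n").getD []
  ((PySem.List.pyRange 0 (PySem.List.len lines) 1).foldl
    (fun (st : List (String × String) × String) (i : Int) =>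
      if PySem.Int.mod i 3 = 0 then (st.1, PySem.List.pyGetD lines i "")
      else if PySem.Int.mod i 3 = 1 then (st.1 ++ [(st.2, PySem.List.pyGetD lines i "")], st.2)
      else (st.1, ""))
    ([], "")).1

-- ===== PORT B =====
def get_line_pairs_alt (inp : String) : List (String × String) :=
  let lines := (PySem.Str.split? inp "\n").getD []
  ((PySem.List.slice? lines none none 3).getD []).zip
    ((PySem.List.slice? lines (some 1) none 3).getD [])

-- ===== PRECONDITION & SPEC =====
def Spec_get_line_pairs (inp : String) (out : List (String × String)) : Prop := out = get_line_pairs_alt inp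
instance (inp : String) (out : List (String × String)) : Decidable (Spec_get_line_pairs inp out) := by unfold Spec_get_line_pairs; infer_instance

-- ===== CLAIM (what is proved, stated in full; the proofs are below) =====
def Claim_equal_get_line_pairs : Prop := ∀ (inp : String), Dom_get_line_pairs inp → Spec_get_line_pairs inp (get_line_pairs inp)

-- ===== LEMMAS AND PROOFS =====

-- the common value both programs compute on the split line list: the (lines[3k], lines[3k+1]) pairs
def pvChunk : List String → List (String × String)
  | a :: b :: _ :: rest => (a, b) :: pvChunk rest
  | [a, b] => [(a, b)]
  | _ => []

-- every third element of its argument (what lines[::3] selects)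
def pvEvery3 {α : Type} : List α → List α
  | a :: _ :: _ :: rest => a :: pvEvery3 rest
  | [a, _] => [a]
  | [a] => [a]
  | [] => []

-- A's loop body applied to an enumerated pair (index, line)
def pvStep (st : List (String × String) × String) (p : Int × String) : List (String × String) × String :=
  if PySem.Int.mod p.1 3 = 0 then (st.1, p.2)
  else if PySem.Int.mod p.1 3 = 1 then (st.1 ++ [(st.2, p.2)], st.2)
  else (st.1, "")

lemma pvFm3 {α : Type} (xs : List α) :
    (List.range ((xs.length + 2) / 3)).filterMap (fun k => xs[3 * k]?) = pvEvery3 xs := by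
  induction xs using pvEvery3.induct with
  | case1 a b c rest ih =>
      have hlen : ((a :: b :: c :: rest).length + 2) / 3 = (rest.length + 2) / 3 + 1 := by
        simp [List.length]; omega
      rw [hlen, List.range_succ_eq_map, List.filterMap_cons, List.filterMap_map]
      simp only [Nat.mul_zero, List.getElem?_cons_zero]
      have hidx : ∀ k, (a :: b :: c :: rest)[3 * Nat.succ k]? = rest[3 * k]? := by
        intro k
        have h3 : 3 * Nat.succ k = 3 * k + 1 + 1 + 1 := by omega
        simp [h3]
      simp only [Function.comp_def, hidx]
      simp [pvEvery3, ih]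
  | case2 a b => simp [pvEvery3, List.range_succ]
  | case3 a => simp [pvEvery3, List.range_succ]
  | case4 => simp [pvEvery3]

lemma pvSliceNone {α : Type} (xs : List α) :
    PySem.List.slice? xs none none 3 = some (pvEvery3 xs) := by
  simp only [PySem.List.slice?, PySem.List.sliceIndices]
  norm_num
  rw [← pvFm3 xs]
  have hc : (if 0 < xs.length then (((xs.length : Int) + 3 - 1) / 3).toNat else 0)
      = (xs.length + 2) / 3 := by split <;> omega
  rw [hc]
  apply List.filterMap_congr
  intro k _
  congr 1

lemma pvSliceOne {α : Type} (xs : List α) :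
    PySem.List.slice? xs (some 1) none 3 = some (pvEvery3 xs.tail) := by
  simp only [PySem.List.slice?, PySem.List.sliceIndices]
  norm_num
  have hc : (if 1 < xs.length then (((xs.length : Int) - min 1 (xs.length : Int) + 3 - 1) / 3).toNat else 0)
      = (xs.tail.length + 2) / 3 := by
    rcases xs with _ | ⟨a, t⟩
    · simp
    · simp only [List.length_cons, List.tail_cons]
      split <;> omega
  rw [hc, ← pvFm3 xs.tail]
  apply List.filterMap_congr
  intro k hk
  rcases xs with _ | ⟨a, t⟩
  · simp at hk
  · have hmin : min (1 : Int) ((a :: t).length : Int) = 1 := by simp only [List.length_cons]; omega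
    rw [hmin]
    have : ((1 : Int) + 3 * (k : Int)).toNat = 3 * k + 1 := by omega
    rw [this]
    simp

lemma pvEvery3_cons₂ {α : Type} (x y : α) (t : List α) :
    pvEvery3 (x :: y :: t) = x :: pvEvery3 t.tail := by
  cases t <;> simp [pvEvery3]

lemma pvZip (ls : List String) :
    (pvEvery3 ls).zip (pvEvery3 ls.tail) = pvChunk ls := by
  induction ls using pvChunk.induct with
  | case1 a b c r ih =>
      rw [show pvEvery3 (a :: b :: c :: r) = a :: pvEvery3 r from rfl]
      rw [show (a :: b :: c :: r).tail = b :: c :: r from rfl, pvEvery3_cons₂]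
      simp only [List.zip] at ih ⊢
      simp [pvChunk, ih]
  | case2 a b => simp [pvEvery3, pvChunk]
  | case3 ls h1 h2 =>
      rcases ls with _ | ⟨a, _ | ⟨b, t⟩⟩
      · simp [pvEvery3, pvChunk]
      · simp [pvEvery3, pvChunk]
      · rcases t with _ | ⟨c, r⟩
        · exact absurd rfl (h2 a b)
        · exact absurd rfl (h1 a b c r)

-- mod-3 successor facts used stepping through A's loop
lemma pvMod1 {s : Int} (h : PySem.Int.mod s 3 = 0) : PySem.Int.mod (s + 1) 3 = 1 := by
  rw [PySem.Int.mod_eq_emod_of_pos (by norm_num)] at *; omega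

lemma pvMod2 {s : Int} (h : PySem.Int.mod s 3 = 0) : PySem.Int.mod (s + 2) 3 = 2 := by
  rw [PySem.Int.mod_eq_emod_of_pos (by norm_num)] at *; omega

lemma pvMod3 {s : Int} (h : PySem.Int.mod s 3 = 0) : PySem.Int.mod (s + 3) 3 = 0 := by
  rw [PySem.Int.mod_eq_emod_of_pos (by norm_num)] at *; omega

lemma pvLoopA : ∀ (ls : List String) (s : Int) (acc : List (String × String)) (last : String),
    PySem.Int.mod s 3 = 0 →
    ((PySem.List.enumerate ls s).foldl pvStep (acc, last)).1 = acc ++ pvChunk ls := by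
  intro ls
  induction ls using pvChunk.induct with
  | case1 a b c r ih =>
      intro s acc last hs
      rw [PySem.List.enumerate_cons, PySem.List.enumerate_cons, PySem.List.enumerate_cons]
      simp only [List.foldl_cons]
      rw [show pvStep (acc, last) (s, a) = (acc, a) by
            simp only [pvStep]; rw [hs]; simp]
      rw [show pvStep (acc, a) (s + 1, b) = (acc ++ [(a, b)], a) by
            simp only [pvStep]; rw [pvMod1 hs]; norm_num]
      rw [show pvStep (acc ++ [(a, b)], a) (s + 1 + 1, c) = (acc ++ [(a, b)], "") by
            simp only [pvStep]
            rw [show s + 1 + 1 = s + 2 by ring, pvMod2 hs]; norm_num]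
      rw [show s + 1 + 1 + 1 = s + 3 by ring,
          ih (s + 3) (acc ++ [(a, b)]) "" (pvMod3 hs)]
      simp [pvChunk]
  | case2 a b =>
      intro s acc last hs
      rw [PySem.List.enumerate_cons, PySem.List.enumerate_cons]
      simp only [List.foldl_cons, PySem.List.enumerate_nil, List.foldl_nil]
      rw [show pvStep (acc, last) (s, a) = (acc, a) by
            simp only [pvStep]; rw [hs]; simp]
      rw [show pvStep (acc, a) (s + 1, b) = (acc ++ [(a, b)], a) by
            simp only [pvStep]; rw [pvMod1 hs]; norm_num]
      simp [pvChunk]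
  | case3 ls h1 h2 =>
      intro s acc last hs
      rcases ls with _ | ⟨a, _ | ⟨b, t⟩⟩
      · simp [PySem.List.enumerate_nil, pvChunk]
      · rw [PySem.List.enumerate_cons]
        simp only [List.foldl_cons, PySem.List.enumerate_nil, List.foldl_nil]
        rw [show pvStep (acc, last) (s, a) = (acc, a) by
              simp only [pvStep]; rw [hs]; simp]
        simp [pvChunk]
      · rcases t with _ | ⟨c, r⟩
        · exact absurd rfl (h2 a b)
        · exact absurd rfl (h1 a b c r)

lemma pvMain (lines : List String) :
    ((PySem.List.pyRange 0 (PySem.List.len lines) 1).foldl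
        (fun (st : List (String × String) × String) (i : Int) =>
          if PySem.Int.mod i 3 = 0 then (st.1, PySem.List.pyGetD lines i "")
          else if PySem.Int.mod i 3 = 1 then (st.1 ++ [(st.2, PySem.List.pyGetD lines i "")], st.2)
          else (st.1, ""))
        ([], "")).1
    = ((PySem.List.slice? lines none none 3).getD []).zip
        ((PySem.List.slice? lines (some 1) none 3).getD []) := by
  rw [pvSliceNone, pvSliceOne]
  simp only [Option.getD_some]
  rw [pvZip]
  have hbridge :
      (PySem.List.pyRange 0 (PySem.List.len lines) 1).foldl
        (fun (st : List (String × String) × String) (i : Int) =>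
          if PySem.Int.mod i 3 = 0 then (st.1, PySem.List.pyGetD lines i "")
          else if PySem.Int.mod i 3 = 1 then (st.1 ++ [(st.2, PySem.List.pyGetD lines i "")], st.2)
          else (st.1, ""))
        ([], "")
      = (PySem.List.enumerate lines 0).foldl pvStep ([], "") := by
    rw [PySem.List.enumerate_eq_map_pyRange lines "", List.foldl_map]
    rfl
  rw [hbridge, pvLoopA lines 0 [] "" (by decide)]
  simp

-- ===== VERDICT (by name: the statement is the Claim_ definition above) =====
theorem get_line_pairs_spec : Claim_equal_get_line_pairs := by
  intro inp _
  exact pvMain ((PySem.Str.split? inp "\n").getD [])
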